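-- pv_equiv track=rewrite | github.com/asmeyatsky/athenaforge | src/athenaforge/domain/services/map_cascade_analyser.py | _transitive_deps
-- ===== SOURCE A (Python) =====
-- from collections import defaultdict, deque
--
-- def _transitive_deps(
--     root: str, dependencies: dict[str, list[str]]
-- ) -> tuple[set[str], int]:
--     """BFS from *root* following the dependency graph.
--
--     Returns ``(all_dependents, max_depth)``.
--     """
--     visited: set[str] = set()
--     queue: deque[tuple[str, int]] = deque([(root, 0)])
--     max_depth = 0
--
--     while queue:
--         node, depth = queue.popleft()
--         for child in dependencies.get(node, []):
--             if child not in visited: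
--                 visited.add(child)
--                 child_depth = depth + 1
--                 max_depth = max(max_depth, child_depth)
--                 queue.append((child, child_depth))
--
--     return visited, max_depth
-- ===== SOURCE B (Python) =====
-- def _transitive_deps(
--     root: str, dependencies: dict[str, list[str]]
-- ) -> tuple[set[str], int]:
--     """Level-synchronous BFS from *root*: expand one whole frontier per step,
--     tracking depth as the level counter instead of per-node in a queue."""
--     visited: set[str] = set()
--     frontier: list[str] = [root]
--     level = 0
--     while frontier:
--         next_frontier: list[str] = []
--         for node in frontier:
--             for child in dependencies.get(node, []):
--                 if child not in visited:
--                     visited.add(child)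
--                     next_frontier.append(child)
--         if next_frontier:
--             level += 1
--         frontier = next_frontier
--     return visited, level
-- ===== Notes on version B (the rewrite author's own statement) =====
-- stated objective: alternative
-- what changed: Replaces the per-node FIFO queue of (node, depth) pairs with a level-synchronous BFS: whole frontiers are expanded at once and the depth is a single level counter incremented per non-empty frontier, so no depth is stored per node and no max() is taken.
import Mathlib
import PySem

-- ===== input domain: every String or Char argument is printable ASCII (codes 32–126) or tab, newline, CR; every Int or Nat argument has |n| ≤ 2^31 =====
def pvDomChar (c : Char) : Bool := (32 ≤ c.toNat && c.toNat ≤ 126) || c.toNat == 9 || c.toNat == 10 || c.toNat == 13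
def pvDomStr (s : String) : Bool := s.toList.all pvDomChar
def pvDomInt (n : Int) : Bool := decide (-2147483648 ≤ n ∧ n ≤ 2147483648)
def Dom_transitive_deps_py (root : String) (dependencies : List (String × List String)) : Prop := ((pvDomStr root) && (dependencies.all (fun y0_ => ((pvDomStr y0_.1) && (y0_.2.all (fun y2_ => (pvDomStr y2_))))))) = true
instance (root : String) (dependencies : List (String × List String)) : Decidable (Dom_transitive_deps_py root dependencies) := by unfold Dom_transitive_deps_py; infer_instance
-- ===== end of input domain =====

-- B replaces A's per-node FIFO queue of (node, depth) pairs by a level-synchronous BFS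
-- with a single level counter (objective: alternative decomposition, same cost).

-- ===== PORT A =====
-- dependencies.get(node, []) — shared by both ports (first-match association-list lookup)
def pvGetDeps (dependencies : List (String × List String)) (node : String) : List String :=
  PySem.Dict.getD (PySem.Dict.mk dependencies) node []

-- body of A's `for child in dependencies.get(node, [])` loop, state (visited, queue, max_depth)
def pvA_inner (d : Int) : (PySem.Set String × List (String × Int) × Int) → String → (PySem.Set String × List (String × Int) × Int)
  | (v, q, m), c =>
    if PySem.Set.contains v c then (v, q, m)
    else (PySem.Set.add v c, q ++ [(c, d + 1)], max m (d + 1))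

-- A's `while queue` loop; the fuel is an upper bound on the number of pops (1 + #enqueues)
def pvA_loop (g : String → List String) : Nat → PySem.Set String → List (String × Int) → Int → List String × Int
  | 0, v, _, m => (v, m)
  | _ + 1, v, [], m => (v, m)
  | fuel + 1, v, (node, d) :: qs, m =>
      match (g node).foldl (pvA_inner d) (v, qs, m) with
      | (v', q', m') => pvA_loop g fuel v' q' m'

def transitive_deps_py (root : String) (dependencies : List (String × List String)) : List String × Int :=
  pvA_loop (pvGetDeps dependencies) (1 + 2 * (dependencies.flatMap Prod.snd).length)
    PySem.Set.empty [(root, 0)] 0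

-- ===== PORT B =====
-- body of B's `for child in dependencies.get(node, [])` loop, state (visited, next_frontier)
def pvB_step : (PySem.Set String × List String) → String → (PySem.Set String × List String)
  | (v, nf), c =>
    if PySem.Set.contains v c then (v, nf)
    else (PySem.Set.add v c, nf ++ [c])

-- B's `for node in frontier` body
def pvB_expand (g : String → List String) (st : PySem.Set String × List String) (node : String) : PySem.Set String × List String :=
  (g node).foldl pvB_step st

-- B's `while frontier` loop; the fuel bounds the number of levels (1 + #visited-adds)
def pvB_loop (g : String → List String) : Nat → PySem.Set String → List String → Int → List String × Int
  | 0, v, _, lvl => (v, lvl)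
  | fuel + 1, v, f, lvl =>
      if f.isEmpty then (v, lvl)
      else
        match f.foldl (pvB_expand g) (v, []) with
        | (v', nf) => pvB_loop g fuel v' nf (if nf.isEmpty then lvl else lvl + 1)

def transitive_deps_py_alt (root : String) (dependencies : List (String × List String)) : List String × Int :=
  pvB_loop (pvGetDeps dependencies) (1 + (dependencies.flatMap Prod.snd).length)
    PySem.Set.empty [root] 0

-- ===== PRECONDITION & SPEC =====
def Spec_transitive_deps_py (root : String) (dependencies : List (String × List String)) (out : List String × Int) : Prop := out = transitive_deps_py_alt root dependencies
instance (root : String) (dependencies : List (String × List String)) (out : List String × Int) : Decidable (Spec_transitive_deps_py root dependencies out) := by unfold Spec_transitive_deps_py; infer_instance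

-- ===== CLAIM (what is proved, stated in full; the proofs are below) =====
def Claim_equal_transitive_deps_py : Prop := ∀ (root : String) (dependencies : List (String × List String)), Dom_transitive_deps_py root dependencies → Spec_transitive_deps_py root dependencies (transitive_deps_py root dependencies)

-- ===== LEMMAS AND PROOFS =====

-- the sublist of children from cs that are new w.r.t. visited v (in discovery order)
def pvCollect (v : List String) : List String → List String
  | [] => []
  | c :: cs => if c ∈ v then pvCollect v cs else c :: pvCollect (v ++ [c]) cs

-- new nodes discovered while expanding a whole frontier f
def pvCollectL (g : String → List String) (v : List String) : List String → List String
  | [] => []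
  | n :: ns =>
      let t := pvCollect v (g n)
      t ++ pvCollectL g (v ++ t) ns

theorem pvCollect_mem {cs : List String} : ∀ {v : List String} {c : String}, c ∈ pvCollect v cs → c ∈ cs ∧ c ∉ v := by
  induction cs with
  | nil => intro v c h; simp [pvCollect] at h
  | cons a cs ih =>
    intro v c h
    by_cases ha : a ∈ v
    · simp only [pvCollect, if_pos ha] at h
      obtain ⟨h1, h2⟩ := ih h
      exact ⟨List.mem_cons_of_mem _ h1, h2⟩
    · simp only [pvCollect, if_neg ha, List.mem_cons] at h
      rcases h with rfl | h
      · exact ⟨List.mem_cons_self, ha⟩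
      · obtain ⟨h1, h2⟩ := ih h
        simp only [List.mem_append, List.mem_singleton] at h2
        push Not at h2
        exact ⟨List.mem_cons_of_mem _ h1, h2.1⟩

theorem pvCollect_nodup {cs : List String} : ∀ {v : List String}, v.Nodup → (v ++ pvCollect v cs).Nodup := by
  induction cs with
  | nil => intro v hv; simpa [pvCollect]
  | cons a cs ih =>
    intro v hv
    by_cases ha : a ∈ v
    · simpa [pvCollect, if_pos ha] using ih hv
    · have hva : (v ++ [a]).Nodup := by
        refine List.Nodup.append hv (List.nodup_singleton a) ?_
        intro x hx hxa
        simp only [List.mem_singleton] at hxa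
        exact ha (hxa ▸ hx)
      have := ih hva
      simpa [pvCollect, if_neg ha, List.append_assoc] using this

theorem pvCollectL_mem {g : String → List String} {f : List String} :
    ∀ {v : List String} {c : String}, c ∈ pvCollectL g v f → c ∉ v ∧ ∃ n ∈ f, c ∈ g n := by
  induction f with
  | nil => intro v c h; simp [pvCollectL] at h
  | cons n ns ih =>
    intro v c h
    simp only [pvCollectL, List.mem_append] at h
    rcases h with h | h
    · obtain ⟨h1, h2⟩ := pvCollect_mem h
      exact ⟨h2, n, List.mem_cons_self, h1⟩
    · obtain ⟨h1, n', hn', hc⟩ := ih h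
      simp only [List.mem_append] at h1
      push Not at h1
      exact ⟨h1.1, n', List.mem_cons_of_mem _ hn', hc⟩

theorem pvCollectL_nodup {g : String → List String} {f : List String} :
    ∀ {v : List String}, v.Nodup → (v ++ pvCollectL g v f).Nodup := by
  induction f with
  | nil => intro v hv; simpa [pvCollectL]
  | cons n ns ih =>
    intro v hv
    have h1 : (v ++ pvCollect v (g n)).Nodup := pvCollect_nodup hv
    have := ih h1
    simpa [pvCollectL, List.append_assoc] using this

-- A's inner child loop computed by pvCollect
theorem pvA_inner_foldl (d : Int) (cs : List String) : ∀ (v : List String) (q : List (String × Int)) (m : Int),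
    cs.foldl (pvA_inner d) (v, q, m)
      = (v ++ pvCollect v cs, q ++ (pvCollect v cs).map (fun c => (c, d + 1)),
         if pvCollect v cs = [] then m else max m (d + 1)) := by
  induction cs with
  | nil => intro v q m; simp [pvCollect]
  | cons c cs ih =>
    intro v q m
    by_cases hc : c ∈ v
    · simpa [pvCollect, if_pos hc, pvA_inner, PySem.Set.contains_iff, hc] using ih v q m
    · have hadd : PySem.Set.add v c = v ++ [c] := PySem.Set.add_of_not_mem hc
      simp only [List.foldl_cons, pvA_inner, PySem.Set.contains_iff]
      rw [if_neg (by simpa using hc), hadd, ih (v ++ [c]) (q ++ [(c, d + 1)]) (max m (d + 1))]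
      simp only [pvCollect, if_neg hc]
      refine Prod.ext (by simp) (Prod.ext (by simp) ?_)
      by_cases ht : pvCollect (v ++ [c]) cs = [] <;>
        simp [ht]

-- B's inner child loop computed by pvCollect
theorem pvB_step_foldl (cs : List String) : ∀ (v nf : List String),
    cs.foldl pvB_step (v, nf) = (v ++ pvCollect v cs, nf ++ pvCollect v cs) := by
  induction cs with
  | nil => intro v nf; simp [pvCollect]
  | cons c cs ih =>
    intro v nf
    by_cases hc : c ∈ v
    · simpa [pvCollect, if_pos hc, pvB_step, PySem.Set.contains_iff, hc] using ih v nf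
    · have hadd : PySem.Set.add v c = v ++ [c] := PySem.Set.add_of_not_mem hc
      simp only [List.foldl_cons, pvB_step, PySem.Set.contains_iff]
      rw [if_neg (by simpa using hc), hadd, ih (v ++ [c]) (nf ++ [c])]
      simp [pvCollect, if_neg hc]

-- B's frontier loop computed by pvCollectL
theorem pvB_expand_foldl (g : String → List String) (f : List String) : ∀ (v acc : List String),
    f.foldl (pvB_expand g) (v, acc) = (v ++ pvCollectL g v f, acc ++ pvCollectL g v f) := by
  induction f with
  | nil => intro v acc; simp [pvCollectL]
  | cons n ns ih =>
    intro v acc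
    simp only [List.foldl_cons, pvB_expand, pvB_step_foldl]
    rw [ih]
    simp [pvCollectL, List.append_assoc]

-- A processes one whole depth-d layer of its queue like B expands the frontier
theorem pvA_level (g : String → List String) (d : Int) (f : List String) :
    ∀ (fuel : Nat) (v nf : List String) (m : Int),
    pvA_loop g (f.length + fuel) v (f.map (fun n => (n, d)) ++ nf.map (fun n => (n, d + 1))) m
      = pvA_loop g fuel (v ++ pvCollectL g v f) ((nf ++ pvCollectL g v f).map (fun n => (n, d + 1)))
          (if pvCollectL g v f = [] then m else max m (d + 1)) := by
  induction f with
  | nil => intro fuel v nf m; simp [pvCollectL]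
  | cons n ns ih =>
    intro fuel v nf m
    have hlen : (n :: ns).length + fuel = (ns.length + fuel) + 1 := by simp [List.length_cons]; omega
    rw [hlen]
    simp only [List.map_cons, List.cons_append, pvA_loop]
    rw [pvA_inner_foldl d (g n) v (ns.map (fun n => (n, d)) ++ nf.map (fun n => (n, d + 1))) m]
    have hq : ns.map (fun n => (n, d)) ++ nf.map (fun n => (n, d + 1)) ++ (pvCollect v (g n)).map (fun c => (c, d + 1))
        = ns.map (fun n => (n, d)) ++ (nf ++ pvCollect v (g n)).map (fun n => (n, d + 1)) := by
      simp [List.map_append, List.append_assoc]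
    rw [hq, ih fuel (v ++ pvCollect v (g n)) (nf ++ pvCollect v (g n)) _]
    simp only [pvCollectL, List.append_assoc]
    by_cases h1 : pvCollect v (g n) = [] <;>
      by_cases h2 : pvCollectL g (v ++ pvCollect v (g n)) ns = [] <;>
      simp [h1, h2]

theorem pvA_loop_nil (g : String → List String) (fuel : Nat) (v : List String) (m : Int) :
    pvA_loop g fuel v [] m = (v, m) := by
  cases fuel <;> rfl

theorem pvB_loop_nil (g : String → List String) (fuel : Nat) (v : List String) (lvl : Int) :
    pvB_loop g fuel v [] lvl = (v, lvl) := by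
  cases fuel <;> rfl

-- number of potential children still unvisited
def pvK (D v : List String) : Nat := (D.toFinset \ v.toFinset).card

theorem pvK_append {D v t : List String} (ht : (v ++ t).Nodup) (hsub : ∀ c ∈ t, c ∈ D) :
    pvK D (v ++ t) + t.length = pvK D v := by
  have hnd : List.Disjoint v t ∧ t.Nodup := by
    have := ht
    rw [List.nodup_append] at this
    exact ⟨fun x hxv hxt => this.2.2 x hxv x hxt rfl, this.2.1⟩
  have hfin : (v ++ t).toFinset = v.toFinset ∪ t.toFinset := by simp
  have hsubF : t.toFinset ⊆ D.toFinset \ v.toFinset := by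
    intro x hx
    simp only [List.mem_toFinset] at hx
    simp only [Finset.mem_sdiff, List.mem_toFinset]
    exact ⟨hsub x hx, fun hxv => hnd.1 hxv hx⟩
  have hcard : t.toFinset.card = t.length := List.toFinset_card_of_nodup hnd.2
  unfold pvK
  have hsd : D.toFinset \ (v.toFinset ∪ t.toFinset) = (D.toFinset \ v.toFinset) \ t.toFinset :=
    (sdiff_sdiff D.toFinset v.toFinset t.toFinset).symm
  rw [hfin, hsd, Finset.card_sdiff, Finset.inter_eq_left.2 hsubF, hcard]
  have hle := Finset.card_le_card hsubF
  rw [hcard] at hle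
  omega

theorem pvK_nil_le (D : List String) : pvK D [] ≤ D.length := by
  unfold pvK
  simp only [List.toFinset_nil, Finset.sdiff_empty]
  exact List.toFinset_card_le D

-- main simulation lemma: A on a clean level = B
theorem pvMain (g : String → List String) (D : List String)
    (hg : ∀ n, ∀ c ∈ g n, c ∈ D) :
    ∀ (fuelB fuelA : Nat) (v f : List String) (d : Int),
    v.Nodup →
    f.length + 2 * pvK D v ≤ fuelA →
    f.length + pvK D v ≤ fuelB →
    pvA_loop g fuelA v (f.map (fun n => (n, d))) d = pvB_loop g fuelB v f d := by
  intro fuelB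
  induction fuelB with
  | zero =>
    intro fuelA v f d hv hA hB
    have hf : f = [] := by
      cases f with
      | nil => rfl
      | cons a l => simp [List.length_cons] at hB
    subst hf
    simp only [List.map_nil]
    rw [pvA_loop_nil, pvB_loop_nil]
  | succ fb ih =>
    intro fuelA v f d hv hA hB
    cases f with
    | nil => simp only [List.map_nil]; rw [pvA_loop_nil, pvB_loop_nil]
    | cons n ns =>
      obtain ⟨fa, rfl⟩ : ∃ fa, fuelA = (n :: ns).length + fa :=
        ⟨fuelA - (n :: ns).length, by simp only [List.length_cons] at *; omega⟩
      have hAlevel := pvA_level g d (n :: ns) fa v [] d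
      simp only [List.map_nil, List.append_nil] at hAlevel
      rw [hAlevel]
      conv_rhs => rw [pvB_loop]
      rw [pvB_expand_foldl g (n :: ns) v []]
      simp only [List.nil_append, List.isEmpty_cons, Bool.false_eq_true, if_false]
      have hsubD : ∀ c ∈ pvCollectL g v (n :: ns), c ∈ D := by
        intro c hc
        obtain ⟨-, n', -, hcg⟩ := pvCollectL_mem hc
        exact hg n' c hcg
      by_cases htnil : pvCollectL g v (n :: ns) = []
      · simp [htnil, pvA_loop_nil, pvB_loop_nil]
      · have hnodup : (v ++ pvCollectL g v (n :: ns)).Nodup := pvCollectL_nodup hv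
        have hKt := pvK_append hnodup hsubD
        rw [if_neg htnil, if_neg (by simpa [List.isEmpty_iff] using htnil)]
        have hmax : max d (d + 1) = d + 1 := max_eq_right (by omega)
        rw [hmax]
        exact ih fa (v ++ pvCollectL g v (n :: ns)) (pvCollectL g v (n :: ns)) (d + 1) hnodup
          (by simp only [List.length_cons] at hA; omega)
          (by simp only [List.length_cons] at hB; omega)

theorem pvGetDeps_cases (dependencies : List (String × List String)) (n : String) :
    pvGetDeps dependencies n = [] ∨ ∃ p ∈ dependencies, pvGetDeps dependencies n = p.2 := by
  induction dependencies with
  | nil => left; rfl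
  | cons p rest ih =>
    unfold pvGetDeps at *
    rw [PySem.Dict.getD_eq_get?_getD, PySem.Dict.get?_mk_cons]
    by_cases h : p.1 == n
    · rw [if_pos h]
      right
      exact ⟨p, List.mem_cons_self, rfl⟩
    · rw [if_neg h, ← PySem.Dict.getD_eq_get?_getD]
      rcases ih with h' | ⟨q, hq, h'⟩
      · left; exact h'
      · right; exact ⟨q, List.mem_cons_of_mem _ hq, h'⟩

theorem pvGetDeps_sub (dependencies : List (String × List String)) (n : String) :
    ∀ c ∈ pvGetDeps dependencies n, c ∈ dependencies.flatMap Prod.snd := by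
  intro c hc
  rcases pvGetDeps_cases dependencies n with h | ⟨p, hp, h⟩
  · rw [h] at hc; simp at hc
  · rw [h] at hc
    exact List.mem_flatMap.2 ⟨p, hp, hc⟩

-- ===== VERDICT (by name: the statement is the Claim_ definition above) =====
theorem transitive_deps_py_spec : Claim_equal_transitive_deps_py := by
  intro root dependencies _
  unfold Spec_transitive_deps_py transitive_deps_py transitive_deps_py_alt
  have hK := pvK_nil_le (dependencies.flatMap Prod.snd)
  exact (pvMain (pvGetDeps dependencies) (dependencies.flatMap Prod.snd)
      (pvGetDeps_sub dependencies)
      (1 + (dependencies.flatMap Prod.snd).length)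
      (1 + 2 * (dependencies.flatMap Prod.snd).length)
      PySem.Set.empty [root] 0 List.nodup_nil
      (by simp only [List.length_cons, List.length_nil, PySem.Set.empty] at *; omega)
      (by simp only [List.length_cons, List.length_nil, PySem.Set.empty] at *; omega))
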